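-- pv_equiv track=rewrite | github.com/laobameishijia/IRattack | py/model/src/gnn/run_measure.py | split_pred_label
-- ===== SOURCE A (Python) =====
-- def split_pred_label(predictions, labels):
--     target_class = 0
--
--     sliced_predictions = []
--     sliced_labels = []
--     slice_index = 0
--
--     for idx, label in enumerate(labels):
--         if label != target_class:
--             sliced_labels.append(labels[slice_index:idx])
--             sliced_predictions.append(predictions[slice_index:idx])
--             slice_index = idx
--             target_class += 1
--
--         if idx == len(labels) - 1:
--             sliced_labels.append(labels[slice_index:])
--             sliced_predictions.append(predictions[slice_index:])
--
--     return sliced_predictions, sliced_labels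
-- ===== SOURCE B (Python) =====
-- def split_pred_label(predictions, labels):
--     if not labels:
--         return [], []
--     cuts = [0]
--     target_class = 0
--     for idx, label in enumerate(labels):
--         if label != target_class:
--             cuts.append(idx)
--             target_class += 1
--     pred_bounds = cuts + [len(predictions)]
--     label_bounds = cuts + [len(labels)]
--     sliced_predictions = [predictions[a:b] for a, b in zip(pred_bounds, pred_bounds[1:])]
--     sliced_labels = [labels[a:b] for a, b in zip(label_bounds, label_bounds[1:])]
--     return sliced_predictions, sliced_labels
-- ===== Notes on version B (the rewrite author's own statement) =====
-- stated objective: simpler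
-- what changed: Instead of interleaving slicing with the scan and a special last-iteration branch, B first collects the cut indices in one pass and then builds each output with a comprehension over consecutive boundary pairs.
import Mathlib
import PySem

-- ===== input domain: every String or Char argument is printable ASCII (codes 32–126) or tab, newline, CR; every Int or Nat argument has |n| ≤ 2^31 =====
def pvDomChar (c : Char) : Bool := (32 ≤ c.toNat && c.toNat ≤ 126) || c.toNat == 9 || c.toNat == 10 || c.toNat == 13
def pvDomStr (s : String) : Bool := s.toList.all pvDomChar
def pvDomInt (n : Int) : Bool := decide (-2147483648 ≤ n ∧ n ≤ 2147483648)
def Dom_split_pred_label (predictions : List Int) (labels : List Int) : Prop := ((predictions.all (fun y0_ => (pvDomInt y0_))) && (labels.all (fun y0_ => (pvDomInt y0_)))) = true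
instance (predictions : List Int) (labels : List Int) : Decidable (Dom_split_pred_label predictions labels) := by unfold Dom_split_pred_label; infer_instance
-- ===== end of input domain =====

-- B replaces A's interleaved scan (slicing inside the loop, plus a special last-iteration
-- branch) by one pass collecting cut indices followed by a comprehension over consecutive
-- boundary pairs; objective: simpler.

-- ===== PORT A =====
-- loop body of A: state = (target_class, sliced_predictions, sliced_labels, slice_index)
def aStep (predictions labels : List Int)
    (s : Int × List (List Int) × List (List Int) × Int) (p : Int × Int) :
    Int × List (List Int) × List (List Int) × Int :=
  let s1 :=
    if p.2 ≠ s.1 then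
      (s.1 + 1,
       s.2.1 ++ [PySem.List.slice predictions (some s.2.2.2) (some p.1)],
       s.2.2.1 ++ [PySem.List.slice labels (some s.2.2.2) (some p.1)],
       p.1)
    else s
  if p.1 = (labels.length : Int) - 1 then
    (s1.1,
     s1.2.1 ++ [PySem.List.slice predictions (some s1.2.2.2) none],
     s1.2.2.1 ++ [PySem.List.slice labels (some s1.2.2.2) none],
     s1.2.2.2)
  else s1

def split_pred_label (predictions : List Int) (labels : List Int) :
    List (List Int) × List (List Int) :=
  let st := (PySem.List.enumerate labels 0).foldl (aStep predictions labels) (0, [], [], 0)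
  (st.2.1, st.2.2.1)

-- ===== PORT B =====
-- loop body of B: state = (cuts, target_class)
def bStep (s : List Int × Int) (p : Int × Int) : List Int × Int :=
  if p.2 ≠ s.2 then (s.1 ++ [p.1], s.2 + 1) else s

def split_pred_label_alt (predictions : List Int) (labels : List Int) :
    List (List Int) × List (List Int) :=
  if labels = [] then ([], []) else
    let cuts := ((PySem.List.enumerate labels 0).foldl bStep ([0], 0)).1
    let pb := cuts ++ [(predictions.length : Int)]
    let lb := cuts ++ [(labels.length : Int)]
    ((pb.zip (PySem.List.slice pb (some 1) none)).map
        (fun ab => PySem.List.slice predictions (some ab.1) (some ab.2)),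
     (lb.zip (PySem.List.slice lb (some 1) none)).map
        (fun ab => PySem.List.slice labels (some ab.1) (some ab.2)))

-- ===== PRECONDITION & SPEC =====
def Spec_split_pred_label (predictions : List Int) (labels : List Int) (out : List (List Int) × List (List Int)) : Prop := out = split_pred_label_alt predictions labels
instance (predictions : List Int) (labels : List Int) (out : List (List Int) × List (List Int)) : Decidable (Spec_split_pred_label predictions labels out) := by unfold Spec_split_pred_label; infer_instance

-- ===== CLAIM (what is proved, stated in full; the proofs are below) =====
def Claim_equal_split_pred_label : Prop := ∀ (predictions : List Int) (labels : List Int), Dom_split_pred_label predictions labels → Spec_split_pred_label predictions labels (split_pred_label predictions labels)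

-- ===== LEMMAS AND PROOFS =====

-- the slices of xs between consecutive boundaries
def pm (xs bs : List Int) : List (List Int) :=
  (bs.zip bs.tail).map (fun ab => PySem.List.slice xs (some ab.1) (some ab.2))

theorem zip_tail_snoc (cs : List Int) (a b : Int) :
    ((cs ++ [a]) ++ [b]).zip ((cs ++ [a]) ++ [b]).tail
      = (cs ++ [a]).zip (cs ++ [a]).tail ++ [(a, b)] := by
  induction cs with
  | nil => simp
  | cons x xs ih =>
    cases xs with
    | nil => simp
    | cons y ys =>
      simp only [List.cons_append, List.tail_cons, List.zip_cons_cons] at *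
      rw [ih]

theorem pm_snoc (xs cs : List Int) (a b : Int) :
    pm xs ((cs ++ [a]) ++ [b])
      = pm xs (cs ++ [a]) ++ [PySem.List.slice xs (some a) (some b)] := by
  unfold pm
  rw [zip_tail_snoc]
  simp

theorem slice_to_len (xs : List Int) {a : Int} (ha : 0 ≤ a) :
    PySem.List.slice xs (some a) (some (xs.length : Int)) = PySem.List.slice xs (some a) none := by
  rw [PySem.List.slice_toNat xs ha (by positivity), PySem.List.slice_from xs ha]
  exact List.take_of_length_le (by simp)

-- main invariant: running A's loop over the remaining suffix, starting from a state that
-- carries the slices of the boundary list (cs ++ [si]) collected so far, yields the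
-- pair-slices of B's final boundary lists.
theorem core (predictions labels : List Int) :
    ∀ (rest : List Int) (i : Int) (tc si : Int) (cs : List Int),
      rest ≠ [] → 0 ≤ i → 0 ≤ si → i + (rest.length : Int) = (labels.length : Int) →
      (((PySem.List.enumerate rest i).foldl (aStep predictions labels)
          (tc, pm predictions (cs ++ [si]), pm labels (cs ++ [si]), si)).2.1,
       ((PySem.List.enumerate rest i).foldl (aStep predictions labels)
          (tc, pm predictions (cs ++ [si]), pm labels (cs ++ [si]), si)).2.2.1) =
      (pm predictions (((PySem.List.enumerate rest i).foldl bStep (cs ++ [si], tc)).1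
          ++ [(predictions.length : Int)]),
       pm labels (((PySem.List.enumerate rest i).foldl bStep (cs ++ [si], tc)).1
          ++ [(labels.length : Int)])) := by
  intro rest
  induction rest with
  | nil => intro _ _ _ _ h; exact absurd rfl h
  | cons x rest ih =>
    intro i tc si cs _ hi hsi hlen
    rw [PySem.List.enumerate_cons]
    simp only [List.foldl_cons]
    by_cases hx : x ≠ tc
    · -- a cut at index i
      have hstepA : aStep predictions labels (tc, pm predictions (cs ++ [si]), pm labels (cs ++ [si]), si) (i, x)
          = (if i = (labels.length : Int) - 1 then
              (tc + 1,
               pm predictions ((cs ++ [si]) ++ [i]) ++ [PySem.List.slice predictions (some i) none],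
               pm labels ((cs ++ [si]) ++ [i]) ++ [PySem.List.slice labels (some i) none], i)
             else (tc + 1, pm predictions ((cs ++ [si]) ++ [i]), pm labels ((cs ++ [si]) ++ [i]), i)) := by
        simp only [aStep, hx, ite_not]
        rw [pm_snoc predictions cs si i, pm_snoc labels cs si i]
        simp
      have hstepB : bStep (cs ++ [si], tc) (i, x) = ((cs ++ [si]) ++ [i], tc + 1) := by
        simp [bStep, hx]
      rw [hstepA, hstepB]
      cases rest with
      | nil =>
        have hieq : i = (labels.length : Int) - 1 := by
          simp only [List.length_cons, List.length_nil] at hlen; omega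
        rw [if_pos hieq]
        simp only [PySem.List.enumerate_nil, List.foldl_nil]
        rw [pm_snoc predictions (cs ++ [si]) i (predictions.length : Int),
            pm_snoc labels (cs ++ [si]) i (labels.length : Int)]
        rw [slice_to_len predictions (by omega), slice_to_len labels (by omega)]
      | cons y rest' =>
        have hine : ¬ i = (labels.length : Int) - 1 := by
          simp at hlen; omega
        simp only [hine, if_false]
        have := ih (i + 1) (tc + 1) i (cs ++ [si]) (by simp) (by omega) hi
          (by simp at hlen ⊢; omega)
        simpa using this
    · -- no cut at index i
      rw [not_not] at hx
      have hstepA : aStep predictions labels (tc, pm predictions (cs ++ [si]), pm labels (cs ++ [si]), si) (i, x)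
          = (if i = (labels.length : Int) - 1 then
              (tc,
               pm predictions (cs ++ [si]) ++ [PySem.List.slice predictions (some si) none],
               pm labels (cs ++ [si]) ++ [PySem.List.slice labels (some si) none], si)
             else (tc, pm predictions (cs ++ [si]), pm labels (cs ++ [si]), si)) := by
        simp [aStep, hx]
      have hstepB : bStep (cs ++ [si], tc) (i, x) = (cs ++ [si], tc) := by
        simp [bStep, hx]
      rw [hstepA, hstepB]
      cases rest with
      | nil =>
        have hieq : i = (labels.length : Int) - 1 := by
          simp only [List.length_cons, List.length_nil] at hlen; omega
        rw [if_pos hieq]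
        simp only [PySem.List.enumerate_nil, List.foldl_nil]
        rw [pm_snoc predictions cs si (predictions.length : Int),
            pm_snoc labels cs si (labels.length : Int)]
        rw [slice_to_len predictions hsi, slice_to_len labels hsi]
      | cons y rest' =>
        have hine : ¬ i = (labels.length : Int) - 1 := by
          simp at hlen; omega
        simp only [hine, if_false]
        exact ih (i + 1) tc si cs (by simp) (by omega) hsi
          (by simp at hlen ⊢; omega)

-- ===== VERDICT (by name: the statement is the Claim_ definition above) =====
theorem split_pred_label_spec : Claim_equal_split_pred_label := by
  intro predictions labels _
  unfold Spec_split_pred_label split_pred_label split_pred_label_alt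
  cases labels with
  | nil => simp [PySem.List.enumerate]
  | cons x ls =>
    simp only [if_neg (List.cons_ne_nil x ls), PySem.List.slice_from_one]
    have h := core predictions (x :: ls) (x :: ls) 0 0 0 [] (by simp) le_rfl le_rfl (by simp)
    simp only [List.nil_append] at h
    rw [show pm predictions [0] = [] from rfl, show pm (x :: ls) [0] = [] from rfl] at h
    exact h
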